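-- pv_equiv track=rewrite | github.com/MaSch882/advent_of_code | 2016/solutions/day_03/main_day_03_2016.py | extract_row_inputs
-- ===== SOURCE A (Python) =====
-- def extract_row_inputs(raw_inputs) -> (list[int], list[int], list[int]):
--     inputs_first_row = []
--     inputs_second_row = []
--     inputs_third_row = []
--     for index, element in enumerate(raw_inputs):
--         if index % 3 == 0:
--             inputs_first_row.append(element)
--         if index % 3 == 1:
--             inputs_second_row.append(element)
--         if index % 3 == 2:
--             inputs_third_row.append(element)
--     return inputs_first_row, inputs_second_row, inputs_third_row
-- ===== SOURCE B (Python) =====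
-- def extract_row_inputs(raw_inputs) -> (list[int], list[int], list[int]):
--     lst = list(raw_inputs)
--     first, second, third = [], [], []
--     for i in range(0, len(lst), 3):
--         chunk = lst[i:i + 3]
--         first += chunk[0:1]
--         second += chunk[1:2]
--         third += chunk[2:3]
--     return first, second, third
-- ===== Notes on version B (the rewrite author's own statement) =====
-- stated objective: alternative
-- what changed: Replaces the per-element index-mod-3 pass with three conditional appends by a chunked loop over range(0, n, 3) that slices each 3-element chunk and extends the three rows by its sub-slices (no index parity test, no per-element conditional).
import Mathlib
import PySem

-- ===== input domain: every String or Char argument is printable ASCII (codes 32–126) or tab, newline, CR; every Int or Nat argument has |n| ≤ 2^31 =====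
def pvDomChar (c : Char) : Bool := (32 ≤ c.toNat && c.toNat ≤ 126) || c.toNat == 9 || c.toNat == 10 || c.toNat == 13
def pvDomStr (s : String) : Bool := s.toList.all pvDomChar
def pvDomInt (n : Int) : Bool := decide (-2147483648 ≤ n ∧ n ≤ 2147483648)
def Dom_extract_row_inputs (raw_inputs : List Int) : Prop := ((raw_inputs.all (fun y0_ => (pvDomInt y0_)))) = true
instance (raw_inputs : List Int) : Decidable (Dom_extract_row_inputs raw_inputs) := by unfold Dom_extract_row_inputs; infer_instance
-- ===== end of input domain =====

-- B replaces A's per-element index-mod-3 pass by a chunked loop over range(0, n, 3)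
-- that slices 3-element chunks; same O(n) cost, an alternative decomposition.


-- ===== PORT A =====
-- the body of A's for-loop: three independent `if index % 3 == r` appends
def loopBodyA (acc : List Int × List Int × List Int) (p : Int × Int) : List Int × List Int × List Int :=
  let acc := if PySem.Int.mod p.1 3 = 0 then (acc.1 ++ [p.2], acc.2.1, acc.2.2) else acc
  let acc := if PySem.Int.mod p.1 3 = 1 then (acc.1, acc.2.1 ++ [p.2], acc.2.2) else acc
  if PySem.Int.mod p.1 3 = 2 then (acc.1, acc.2.1, acc.2.2 ++ [p.2]) else acc

def extract_row_inputs (raw_inputs : List Int) : List Int × List Int × List Int :=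
  (PySem.List.enumerate raw_inputs 0).foldl loopBodyA ([], [], [])

-- ===== PORT B =====
def extract_row_inputs_alt (raw_inputs : List Int) : List Int × List Int × List Int :=
  let lst := raw_inputs
  (PySem.List.pyRange 0 (PySem.List.len lst) 3).foldl
    (fun acc i =>
      let chunk := PySem.List.slice lst (some i) (some (i + 3))
      (acc.1 ++ PySem.List.slice chunk (some 0) (some 1),
       acc.2.1 ++ PySem.List.slice chunk (some 1) (some 2),
       acc.2.2 ++ PySem.List.slice chunk (some 2) (some 3)))
    ([], [], [])

-- ===== PRECONDITION & SPEC =====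
def Spec_extract_row_inputs (raw_inputs : List Int) (out : List Int × List Int × List Int) : Prop := out = extract_row_inputs_alt raw_inputs
instance (raw_inputs : List Int) (out : List Int × List Int × List Int) : Decidable (Spec_extract_row_inputs raw_inputs out) := by unfold Spec_extract_row_inputs; infer_instance

-- ===== CLAIM (what is proved, stated in full; the proofs are below) =====
def Claim_equal_extract_row_inputs : Prop := ∀ (raw_inputs : List Int), Dom_extract_row_inputs raw_inputs → Spec_extract_row_inputs raw_inputs (extract_row_inputs raw_inputs)

-- ===== LEMMAS AND PROOFS =====

-- reference form: rows built three elements at a time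
def rows3 : List Int → List Int × List Int × List Int
  | [] => ([], [], [])
  | [a] => ([a], [], [])
  | [a, b] => ([a], [b], [])
  | a :: b :: c :: rest =>
      let r := rows3 rest
      (a :: r.1, b :: r.2.1, c :: r.2.2)

theorem fmod_three_eq (s : Int) : PySem.Int.mod s 3 = s % 3 := by
  simp [PySem.Int.mod, Int.fmod_eq_emod]

theorem pyRange3_nil (a b : Int) (h : b ≤ a) : PySem.List.pyRange a b 3 = [] := by
  rw [PySem.List.pyRange_of_pos a b (by norm_num)]
  simp [show ¬ a < b by omega]

theorem pyRange3_cons (a b : Int) (h : a < b) : PySem.List.pyRange a b 3 = a :: PySem.List.pyRange (a + 3) b 3 := by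
  rw [PySem.List.pyRange_of_pos a b (by norm_num), PySem.List.pyRange_of_pos (a + 3) b (by norm_num)]
  by_cases h3 : a + 3 < b
  · have hc : ((b - a + 3 - 1) / 3).toNat = ((b - (a + 3) + 3 - 1) / 3).toNat + 1 := by omega
    simp only [if_pos h, if_pos h3, hc, List.range_succ_eq_map, List.map_cons, List.map_map]
    refine congrArg₂ List.cons (by norm_num) ?_
    apply List.map_congr_left
    intro k _
    simp [Function.comp]
    ring
  · have hc : ((b - a + 3 - 1) / 3).toNat = 1 := by omega
    simp [if_pos h, if_neg h3, hc, List.range_succ]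

theorem slice_take_one (xs : List Int) : PySem.List.slice xs none (some 1) = xs.take 1 := by
  have := PySem.List.slice_to_natCast xs 1; push_cast at this; simpa using this

theorem slice_one_two (xs : List Int) : PySem.List.slice xs (some 1) (some 2) = (xs.drop 1).take 1 := by
  have := PySem.List.slice_natCast xs 1 2; push_cast at this; simpa using this

theorem slice_two_three (xs : List Int) : PySem.List.slice xs (some 2) (some 3) = (xs.drop 2).take 1 := by
  have := PySem.List.slice_natCast xs 2 3; push_cast at this; simpa using this

theorem loopBodyA_zero (acc : List Int × List Int × List Int) (i x : Int)
    (h : PySem.Int.mod i 3 = 0) : loopBodyA acc (i, x) = (acc.1 ++ [x], acc.2.1, acc.2.2) := by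
  simp only [loopBodyA, h]; norm_num

theorem loopBodyA_one (acc : List Int × List Int × List Int) (i x : Int)
    (h : PySem.Int.mod i 3 = 1) : loopBodyA acc (i, x) = (acc.1, acc.2.1 ++ [x], acc.2.2) := by
  simp only [loopBodyA, h]; norm_num

theorem loopBodyA_two (acc : List Int × List Int × List Int) (i x : Int)
    (h : PySem.Int.mod i 3 = 2) : loopBodyA acc (i, x) = (acc.1, acc.2.1, acc.2.2 ++ [x]) := by
  simp only [loopBodyA, h]; norm_num

-- A's fold over enumerate xs s (s a multiple of 3) appends rows3 xs to the accumulators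
theorem foldA_general (xs : List Int) : ∀ (s : Int) (u v w : List Int), 0 ≤ s → s % 3 = 0 →
    (PySem.List.enumerate xs s).foldl loopBodyA (u, v, w)
    = (u ++ (rows3 xs).1, v ++ (rows3 xs).2.1, w ++ (rows3 xs).2.2) := by
  induction xs using rows3.induct with
  | case1 => intro s u v w _ _; simp [PySem.List.enumerate, rows3]
  | case2 a =>
      intro s u v w hs hm
      have e0 : PySem.Int.mod s 3 = 0 := by rw [fmod_three_eq s]; omega
      simp only [PySem.List.enumerate_cons, List.foldl_cons, loopBodyA_zero _ _ _ e0]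
      simp [PySem.List.enumerate, rows3]
  | case3 a b =>
      intro s u v w hs hm
      have e0 : PySem.Int.mod s 3 = 0 := by rw [fmod_three_eq s]; omega
      have e1 : PySem.Int.mod (s + 1) 3 = 1 := by rw [fmod_three_eq _]; omega
      simp only [PySem.List.enumerate_cons, List.foldl_cons,
                 loopBodyA_zero _ _ _ e0, loopBodyA_one _ _ _ e1]
      simp [PySem.List.enumerate, rows3]
  | case4 a b c rest ih =>
      intro s u v w hs hm
      have e0 : PySem.Int.mod s 3 = 0 := by rw [fmod_three_eq s]; omega
      have e1 : PySem.Int.mod (s + 1) 3 = 1 := by rw [fmod_three_eq _]; omega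
      have e2 : PySem.Int.mod (s + 1 + 1) 3 = 2 := by rw [fmod_three_eq _]; omega
      simp only [PySem.List.enumerate_cons, List.foldl_cons,
                 loopBodyA_zero _ _ _ e0, loopBodyA_one _ _ _ e1, loopBodyA_two _ _ _ e2]
      rw [ih (s + 1 + 1 + 1) (u ++ [a]) (v ++ [b]) (w ++ [c]) (by omega) (by omega)]
      simp [rows3]

-- B's fold over pyRange (3k) n 3 appends rows3 (lst.drop (3k)) to the accumulators
theorem foldB_general (lst : List Int) (t : List Int) : ∀ (k : Nat) (u v w : List Int),
    t = lst.drop (3 * k) →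
    (PySem.List.pyRange (3 * (k : Int)) (PySem.List.len lst) 3).foldl
      (fun acc i =>
        let chunk := PySem.List.slice lst (some i) (some (i + 3))
        (acc.1 ++ PySem.List.slice chunk (some 0) (some 1),
         acc.2.1 ++ PySem.List.slice chunk (some 1) (some 2),
         acc.2.2 ++ PySem.List.slice chunk (some 2) (some 3)))
      (u, v, w)
    = (u ++ (rows3 t).1, v ++ (rows3 t).2.1, w ++ (rows3 t).2.2) := by
  induction t using rows3.induct with
  | case1 =>
      intro k u v w ht
      have hlen : (lst.length : Int) ≤ 3 * (k : Int) := by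
        have := List.drop_eq_nil_iff.mp ht.symm
        push_cast; omega
      rw [PySem.List.len_eq, pyRange3_nil _ _ hlen]
      simp [rows3]
  | case2 a =>
      intro k u v w ht
      have hdl : (lst.drop (3 * k)).length = 1 := by rw [← ht]; rfl
      have hlen : lst.length = 3 * k + 1 := by
        have := List.length_drop (l := lst) (i := 3 * k); omega
      have hchunk : PySem.List.slice lst (some (3 * (k : Int))) (some (3 * (k : Int) + 3)) = [a] := by
        have := PySem.List.slice_natCast_add lst (3 * k) 3
        push_cast at this ⊢
        rw [this, ← ht]
        rfl
      rw [PySem.List.len_eq, pyRange3_cons _ _ (by push_cast; omega),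
          pyRange3_nil _ _ (by push_cast; omega)]
      simp [List.foldl, hchunk, slice_take_one, slice_one_two, slice_two_three, rows3]
  | case3 a b =>
      intro k u v w ht
      have hdl : (lst.drop (3 * k)).length = 2 := by rw [← ht]; rfl
      have hlen : lst.length = 3 * k + 2 := by
        have := List.length_drop (l := lst) (i := 3 * k); omega
      have hchunk : PySem.List.slice lst (some (3 * (k : Int))) (some (3 * (k : Int) + 3)) = [a, b] := by
        have := PySem.List.slice_natCast_add lst (3 * k) 3
        push_cast at this ⊢
        rw [this, ← ht]
        rfl
      rw [PySem.List.len_eq, pyRange3_cons _ _ (by push_cast; omega),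
          pyRange3_nil _ _ (by push_cast; omega)]
      simp [List.foldl, hchunk, slice_take_one, slice_one_two, slice_two_three, rows3]
  | case4 a b c rest ih =>
      intro k u v w ht
      have hdl : 3 ≤ (lst.drop (3 * k)).length := by rw [← ht]; simp
      have hlen : 3 * k + 3 ≤ lst.length := by
        have := List.length_drop (l := lst) (i := 3 * k); omega
      have hchunk : PySem.List.slice lst (some (3 * (k : Int))) (some (3 * (k : Int) + 3)) = [a, b, c] := by
        have := PySem.List.slice_natCast_add lst (3 * k) 3
        push_cast at this ⊢
        rw [this, ← ht]
        rfl
      have hrest : rest = lst.drop (3 * (k + 1)) := by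
        have : lst.drop (3 * (k + 1)) = (lst.drop (3 * k)).drop 3 := by
          rw [List.drop_drop]; ring_nf
        rw [this, ← ht]
        rfl
      rw [PySem.List.len_eq, pyRange3_cons _ _ (by push_cast; omega)]
      simp only [List.foldl, hchunk]
      have hstep : (3 : Int) * (k : Int) + 3 = 3 * ((k + 1 : Nat) : Int) := by push_cast; ring
      simp only [slice_take_one, slice_one_two, slice_two_three, PySem.List.slice_zero_start] at ih ⊢
      rw [hstep, ← PySem.List.len_eq, ih (k + 1) _ _ _ hrest]
      simp [rows3]

-- ===== VERDICT (by name: the statement is the Claim_ definition above) =====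
theorem extract_row_inputs_spec : Claim_equal_extract_row_inputs := by
  intro xs _
  unfold Spec_extract_row_inputs extract_row_inputs extract_row_inputs_alt
  rw [foldA_general xs 0 [] [] [] le_rfl rfl]
  have := foldB_general xs xs 0 [] [] [] (by simp)
  simp only [Nat.cast_zero, mul_zero] at this
  rw [this]
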